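-- pv_equiv track=rewrite | github.com/Ghosterio/MAI_Workbench | MODWork.py | graph_incidence_matrix
-- ===== SOURCE A (Python) =====
-- def graph_adjacency_list(edges, directed):
--     graph = {}
--     for edge in edges:
--         node1, node2 = edge[:2]
--         if node1 not in graph:
--             graph[node1] = []
--         if node2 not in graph:
--             graph[node2] = []
--         graph[node1].append(node2)
--         if not directed:
--             graph[node2].append(node1)
--     return graph
--
-- def graph_incidence_matrix(edges, directed):
--     graph = graph_adjacency_list(edges, directed)
--     nodes = list(graph.keys())
--     nodes.sort()
--     size = len(nodes)
--     matrix = [[0] * len(edges) for _ in range(size)]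
--     for index, edge in enumerate(edges):
--         node1, node2 = edge[:2]
--         index1, index2 = nodes.index(node1), nodes.index(node2)
--         matrix[index1][index] = 1
--         if not directed:
--             matrix[index2][index] = 1
--     return matrix, nodes, edges
-- ===== SOURCE B (Python) =====
-- def graph_incidence_matrix(edges, directed):
--     ends = []
--     seen = set()
--     for edge in edges:
--         n1, n2 = edge[:2]
--         ends.append((n1, n2))
--         seen.add(n1)
--         seen.add(n2)
--     nodes = sorted(seen)
--     matrix = [[1 if n1 == node or (not directed and n2 == node) else 0
--                for (n1, n2) in ends]
--               for node in nodes]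
--     return matrix, nodes, edges
-- ===== Notes on version B (the rewrite author's own statement) =====
-- stated objective: alternative
-- what changed: B drops the adjacency-dict helper and the scatter loop that assigns matrix[nodes.index(node)][edge_index]=1 into a preallocated zero matrix; instead it makes one pass extracting endpoint pairs and a node set, sorts the set, and builds each row node-major by a direct gather comprehension, eliminating the repeated list.index scans.
import Mathlib
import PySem

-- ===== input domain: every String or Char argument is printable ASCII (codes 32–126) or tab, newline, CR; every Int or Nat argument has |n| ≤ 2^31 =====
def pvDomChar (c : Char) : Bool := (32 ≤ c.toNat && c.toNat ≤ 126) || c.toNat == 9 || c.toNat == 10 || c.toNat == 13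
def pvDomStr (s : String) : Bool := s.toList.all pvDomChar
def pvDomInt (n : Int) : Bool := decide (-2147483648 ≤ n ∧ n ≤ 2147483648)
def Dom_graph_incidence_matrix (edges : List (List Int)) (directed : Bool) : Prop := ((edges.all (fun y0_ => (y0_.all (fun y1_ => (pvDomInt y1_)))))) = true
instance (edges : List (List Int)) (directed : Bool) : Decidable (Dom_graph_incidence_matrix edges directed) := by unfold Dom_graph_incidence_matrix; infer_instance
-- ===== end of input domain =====

-- B builds the matrix node-major by gather (one row comprehension per sorted node) instead of
-- A's edge-major scatter into a preallocated zero matrix via an adjacency-dict and list.index.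


-- ===== PORT A =====
-- 'node1, node2 = edge[:2]' (both Pythons have this line); on an edge shorter than 2 Python
-- raises ValueError — those inputs are excluded by Pre_ below, the (0,0) default is never claimed.
def pvEnds (e : List Int) : Int × Int :=
  match PySem.List.slice e none (some 2) with
  | [n1, n2] => (n1, n2)
  | _ => (0, 0)

-- graph_adjacency_list
def pvAdj (edges : List (List Int)) (directed : Bool) : PySem.Dict Int (List Int) :=
  edges.foldl (fun g e =>
    let p := pvEnds e
    let g := if g.contains p.1 then g else g.insert p.1 []
    let g := if g.contains p.2 then g else g.insert p.2 []
    let g := g.modify p.1 [] (fun l => l ++ [p.2])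
    if !directed then g.modify p.2 [] (fun l => l ++ [p.1]) else g) PySem.Dict.empty

def graph_incidence_matrix (edges : List (List Int)) (directed : Bool) : List (List Int) × List Int × List (List Int) :=
  let graph := pvAdj edges directed
  let nodes := PySem.List.sorted graph.keys (fun x => x) false
  let size := nodes.length
  let matrix0 : List (List Int) := (List.range size).map (fun _ => List.replicate edges.length 0)
  let matrix := (PySem.List.enumerate edges 0).foldl (fun m p =>
      let e := pvEnds p.2
      match PySem.List.index? nodes e.1, PySem.List.index? nodes e.2 with
      | some i1, some i2 =>
        let m := m.set i1 ((m.getD i1 []).set p.1.toNat 1)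
        if !directed then m.set i2 ((m.getD i2 []).set p.1.toNat 1) else m
      | _, _ => m) matrix0   -- nodes.index never raises here: every endpoint is a dict key
  (matrix, nodes, edges)

-- ===== PORT B =====
def graph_incidence_matrix_alt (edges : List (List Int)) (directed : Bool) : List (List Int) × List Int × List (List Int) :=
  let step := edges.foldl (fun (acc : List (Int × Int) × PySem.Set Int) e =>
      let p := pvEnds e
      (acc.1 ++ [p], (acc.2.add p.1).add p.2)) ([], PySem.Set.empty)
  let ends := step.1
  let nodes := PySem.List.sorted step.2 (fun x => x) false
  let matrix := nodes.map (fun node => ends.map (fun p =>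
      if p.1 == node || (!directed && p.2 == node) then (1 : Int) else 0))
  (matrix, nodes, edges)

-- ===== PRECONDITION & SPEC =====
-- Both Pythons raise ValueError ('not enough values to unpack') on an edge with fewer than 2 entries.
def Pre_graph_incidence_matrix (edges : List (List Int)) (directed : Bool) : Prop :=
  ∀ e ∈ edges, 2 ≤ e.length
instance (edges : List (List Int)) (directed : Bool) : Decidable (Pre_graph_incidence_matrix edges directed) := by unfold Pre_graph_incidence_matrix; infer_instance

def pvWitness_graph_incidence_matrix : List (List Int) × Bool := ([[1, 2], [2, 3, 9], [3, 1]], false)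

def Spec_graph_incidence_matrix (edges : List (List Int)) (directed : Bool) (out : List (List Int) × List Int × List (List Int)) : Prop := out = graph_incidence_matrix_alt edges directed
instance (edges : List (List Int)) (directed : Bool) (out : List (List Int) × List Int × List (List Int)) : Decidable (Spec_graph_incidence_matrix edges directed out) := by unfold Spec_graph_incidence_matrix; infer_instance

-- ===== CLAIM (what is proved, stated in full; the proofs are below) =====
def Claim_equal_graph_incidence_matrix : Prop := ∀ (edges : List (List Int)) (directed : Bool), Dom_graph_incidence_matrix edges directed → Pre_graph_incidence_matrix edges directed → Spec_graph_incidence_matrix edges directed (graph_incidence_matrix edges directed)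

-- ===== LEMMAS AND PROOFS =====

-- the endpoint stream of the edge list
def pvEps (edges : List (List Int)) : List Int :=
  edges.flatMap (fun e => [(pvEnds e).1, (pvEnds e).2])

theorem pvEps_cons (e : List Int) (es : List (List Int)) :
    pvEps (e :: es) = (pvEnds e).1 :: (pvEnds e).2 :: pvEps es := rfl

-- keys of A's adjacency dict = set-fold of the endpoint stream
theorem pvAdj_keys_aux (edges : List (List Int)) (directed : Bool)
    (g : PySem.Dict Int (List Int)) :
    (edges.foldl (fun g e =>
      let p := pvEnds e
      let g := if g.contains p.1 then g else g.insert p.1 []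
      let g := if g.contains p.2 then g else g.insert p.2 []
      let g := g.modify p.1 [] (fun l => l ++ [p.2])
      if !directed then g.modify p.2 [] (fun l => l ++ [p.1]) else g) g).keys
    = (pvEps edges).foldl PySem.Set.add g.keys := by
  induction edges generalizing g with
  | nil => rfl
  | cons e es ih =>
    simp only [List.foldl_cons, pvEps_cons, ih]
    congr 1
    have hins : ∀ (d : PySem.Dict Int (List Int)) (k : Int) (v : List Int),
        (d.insert k v).keys = PySem.Set.add d.keys k := by
      intro d k v
      by_cases h : d.contains k = true
      · rw [PySem.Dict.keys_insert_of_contains d v h]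
        rw [PySem.Dict.contains_eq_decide_mem_keys] at h
        simp only [PySem.Set.add, PySem.Set.contains]
        simp_all
      · rw [PySem.Dict.keys_insert_of_not_contains d v (by simpa using h)]
        rw [PySem.Dict.contains_eq_decide_mem_keys] at h
        simp only [PySem.Set.add, PySem.Set.contains]
        simp_all
    have habs : ∀ (s : List Int) (x : Int), x ∈ s → PySem.Set.add s x = s := by
      intro s x hx
      simp only [PySem.Set.add, PySem.Set.contains]
      simp [hx]
    set p := pvEnds e with hp
    set g1 := if g.contains p.1 then g else g.insert p.1 [] with hg1d
    set g2 := if g1.contains p.2 then g1 else g1.insert p.2 [] with hg2d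
    have hg1 : g1.keys = PySem.Set.add g.keys p.1 := by
      rw [hg1d]; split_ifs with h
      · rw [habs g.keys p.1 (by rw [PySem.Dict.contains_eq_decide_mem_keys] at h; simpa using h)]
      · exact hins g p.1 []
    have hg2 : g2.keys = PySem.Set.add g1.keys p.2 := by
      rw [hg2d]; split_ifs with h
      · rw [habs g1.keys p.2 (by rw [PySem.Dict.contains_eq_decide_mem_keys] at h; simpa using h)]
      · exact hins g1 p.2 []
    have hmem1 : p.1 ∈ g2.keys := by
      rw [hg2, hg1]
      simp [PySem.Set.mem_add]
    have hmem2 : p.2 ∈ g2.keys := by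
      rw [hg2]
      simp [PySem.Set.mem_add]
    have hg3 : ∀ f, ((g2.modify p.1 [] f)).keys = g2.keys := by
      intro f
      rw [PySem.Dict.keys_modify, hins, habs _ _ hmem1]
    by_cases hd : directed
    · simp only [hd, Bool.not_true, if_neg (by decide : ¬ (false = true)), hg3, hg2, hg1]
    · rw [Bool.not_eq_true] at hd
      simp only [hd, Bool.not_false, if_true]
      rw [PySem.Dict.keys_modify, hins,
        habs _ _ (by rw [hg3]; exact hmem2 : p.2 ∈ ((g2.modify p.1 [] fun l => l ++ [p.2])).keys),
        hg3, hg2, hg1]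
theorem pvAdj_keys (edges : List (List Int)) (directed : Bool) :
    (pvAdj edges directed).keys = PySem.Set.ofList (pvEps edges) := by
  rw [PySem.Set.ofList_eq_foldl]
  exact pvAdj_keys_aux edges directed PySem.Dict.empty

-- B's accumulation pass
theorem pvAltFold (edges : List (List Int)) (acc : List (Int × Int) × PySem.Set Int) :
    edges.foldl (fun (acc : List (Int × Int) × PySem.Set Int) e =>
      let p := pvEnds e
      (acc.1 ++ [p], (acc.2.add p.1).add p.2)) acc
    = (acc.1 ++ edges.map pvEnds, (pvEps edges).foldl PySem.Set.add acc.2) := by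
  induction edges generalizing acc with
  | nil => simp [pvEps]
  | cons e es ih => simp [ih, pvEps_cons]

-- setting the unique occurrence inside a map over a nodup list
theorem pvSet_map_nodup {l : List Int} (hnd : l.Nodup) {i : Nat} {x : Int}
    (hi : PySem.List.index? l x = some i) (f : Int → List Int) (v : List Int) :
    (l.map f).set i v = l.map (fun y => if y = x then v else f y) := by
  obtain ⟨hk, hx, -⟩ := PySem.List.getElem_of_index?_eq_some hi
  apply List.ext_getElem (by simp)
  intro j hj hj'
  simp only [List.length_map] at hj'
  rw [List.getElem_set, List.getElem_map, List.getElem_map]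
  by_cases h : i = j
  · subst h; simp [hx]
  · have hne : l[j] ≠ x := fun he => h (hnd.getElem_inj_iff.mp (hx.trans he.symm))
    simp [h, hne]

theorem pvGetD_map_nodup {l : List Int} (_hnd : l.Nodup) {i : Nat} {x : Int}
    (hi : PySem.List.index? l x = some i) (f : Int → List Int) :
    (l.map f).getD i [] = f x := by
  obtain ⟨hk, hx, -⟩ := PySem.List.getElem_of_index?_eq_some hi
  rw [List.getD_eq_getElem?_getD, List.getElem?_map]
  simp [List.getElem?_eq_getElem hk, hx]

-- column value of B's gather
def pvCol (directed : Bool) (y : Int) (p : Int × Int) : Int :=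
  if p.1 == y || (!directed && p.2 == y) then 1 else 0

-- A's scatter loop, characterised row-wise
theorem pvScatter (nodes : List Int) (hnd : nodes.Nodup) (directed : Bool) :
    ∀ (es : List (List Int)) (k : Nat) (done : Int → List Int),
    (∀ e ∈ es, (pvEnds e).1 ∈ nodes ∧ (pvEnds e).2 ∈ nodes) →
    (∀ y, (done y).length = k) →
    (PySem.List.enumerate es (k : Int)).foldl (fun m p =>
      let e := pvEnds p.2
      match PySem.List.index? nodes e.1, PySem.List.index? nodes e.2 with
      | some i1, some i2 =>
        let m := m.set i1 ((m.getD i1 []).set p.1.toNat (1 : Int))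
        if !directed then m.set i2 ((m.getD i2 []).set p.1.toNat (1 : Int)) else m
      | _, _ => m)
      (nodes.map (fun y => done y ++ List.replicate es.length (0 : Int)))
    = nodes.map (fun y => done y ++ es.map (fun e => pvCol directed y (pvEnds e))) := by
  intro es
  induction es with
  | nil => intro k done _ _; simp
  | cons e es ih =>
    intro k done hmem hlen
    rw [PySem.List.enumerate_cons, List.foldl_cons]
    obtain ⟨h1, h2⟩ := hmem e (by simp)
    obtain ⟨i1, hi1⟩ := Option.isSome_iff_exists.mp ((PySem.List.index?_isSome_iff nodes (pvEnds e).1).mpr h1)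
    obtain ⟨i2, hi2⟩ := Option.isSome_iff_exists.mp ((PySem.List.index?_isSome_iff nodes (pvEnds e).2).mpr h2)
    have hrepl : List.replicate (es.length + 1) (0 : Int) = 0 :: List.replicate es.length 0 := rfl
    set f0 : Int → List Int := fun y => done y ++ List.replicate (e :: es).length 0 with hf0
    have hset : ∀ y : Int,
        (done y ++ 0 :: List.replicate es.length (0 : Int)).set k 1
        = done y ++ 1 :: List.replicate es.length 0 := by
      intro y
      rw [List.set_append_right _ _ (le_of_eq (hlen y))]
      simp [hlen y]
    have hset1 : ∀ y : Int,
        (done y ++ 1 :: List.replicate es.length (0 : Int)).set k 1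
        = done y ++ 1 :: List.replicate es.length 0 := by
      intro y
      rw [List.set_append_right _ _ (le_of_eq (hlen y))]
      simp [hlen y]
    set f1 : Int → List Int :=
      fun y => if y = (pvEnds e).1 then (f0 (pvEnds e).1).set k 1 else f0 y with hf1
    have hM1 : (nodes.map f0).set i1 (((nodes.map f0).getD i1 []).set k 1) = nodes.map f1 := by
      rw [pvGetD_map_nodup hnd hi1, pvSet_map_nodup hnd hi1]
    have hstep :
        (let p := ((k : Int), e)
         let e' := pvEnds p.2
         match PySem.List.index? nodes e'.1, PySem.List.index? nodes e'.2 with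
         | some i1, some i2 =>
           let m := (nodes.map f0).set i1 (((nodes.map f0).getD i1 []).set p.1.toNat 1)
           if !directed then m.set i2 ((m.getD i2 []).set p.1.toNat 1) else m
         | _, _ => nodes.map f0)
        = nodes.map (fun y => (done y ++ [pvCol directed y (pvEnds e)]) ++ List.replicate es.length 0) := by
      simp only [hi1, hi2]
      simp only [Int.toNat_natCast, hM1]
      by_cases hd : directed
      · simp only [hd, Bool.not_true, if_neg (by decide : ¬ (false = true))]
        apply List.map_congr_left
        intro y _
        by_cases hy : y = (pvEnds e).1
        · simp [hf1, hy, hf0, hrepl, hset, pvCol, hd, List.append_assoc]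
        · simp [hf1, hy, hf0, hrepl, pvCol, hd, Ne.symm hy, List.append_assoc]
      · rw [Bool.not_eq_true] at hd
        simp only [hd, Bool.not_false, if_true]
        rw [pvGetD_map_nodup hnd hi2, pvSet_map_nodup hnd hi2]
        apply List.map_congr_left
        intro y _
        by_cases hy2 : y = (pvEnds e).2
        · subst hy2
          by_cases hy1 : (pvEnds e).2 = (pvEnds e).1
          · simp [hf1, hy1, hf0, hrepl, hset, hset1, pvCol, hd, List.append_assoc]
          · simp [hf1, hy1, hf0, hrepl, hset, pvCol, hd, List.append_assoc]
        · by_cases hy1 : y = (pvEnds e).1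
          · have h12 : ¬ (pvEnds e).1 = (pvEnds e).2 := fun h => hy2 (hy1.trans h)
            simp [hf1, hy2, hy1, hf0, hrepl, hset, hset1, pvCol, hd, h12, List.append_assoc]
          · simp [hf1, hy2, hy1, hf0, hrepl, pvCol, hd, Ne.symm hy2, Ne.symm hy1, List.append_assoc]
    rw [hstep]
    have hcast : (k : Int) + 1 = ((k + 1 : Nat) : Int) := by push_cast; ring
    rw [hcast, ih (k + 1) (fun y => done y ++ [pvCol directed y (pvEnds e)])
      (fun e' he' => hmem e' (by simp [he'])) (fun y => by simp [hlen y])]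
    simp [List.append_assoc]

-- ===== VERDICT (by name: the statement is the Claim_ definition above) =====
theorem graph_incidence_matrix_spec : Claim_equal_graph_incidence_matrix := by
  intro edges directed _ _
  unfold Spec_graph_incidence_matrix graph_incidence_matrix graph_incidence_matrix_alt
  rw [pvAltFold]
  simp only [pvAdj_keys, List.nil_append]
  set nodes := PySem.List.sorted (PySem.Set.ofList (pvEps edges)) (fun x => x) false with hn
  have hnd : nodes.Nodup :=
    (PySem.List.sorted_ofList_pairwise_lt (xs := pvEps edges)).imp ne_of_lt
  have hmem : ∀ e ∈ edges, (pvEnds e).1 ∈ nodes ∧ (pvEnds e).2 ∈ nodes := by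
    intro e he
    rw [hn]
    constructor <;> rw [PySem.List.mem_sorted, PySem.Set.mem_ofList] <;>
      exact List.mem_flatMap.mpr ⟨e, he, by simp⟩
  have hinit : (List.range nodes.length).map (fun _ => List.replicate edges.length (0 : Int))
      = nodes.map (fun y => ([] : List Int) ++ List.replicate edges.length (0 : Int)) := by
    simp [List.map_const']
  rw [hinit]
  have hs := pvScatter nodes hnd directed edges 0 (fun _ => ([] : List Int)) hmem (fun _ => rfl)
  simp only [Nat.cast_zero] at hs
  rw [hs]
  have hnodes : (PySem.List.sorted (List.foldl PySem.Set.add PySem.Set.empty (pvEps edges)) (fun x => x) false) = nodes := by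
    rw [hn, PySem.Set.ofList_eq_foldl]
    rfl
  simp only [Prod.mk.injEq, hnodes, List.nil_append]
  refine ⟨?_, trivial⟩
  simp [pvCol, List.map_map, Function.comp]
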